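-- pv_equiv track=rewrite | github.com/GPS-Demos/NCDIT-ADA-FILES | extraction_tests_simplied_html_generator/render_json.py | _remove_empty_pages
-- ===== SOURCE A (Python) =====
-- def _remove_empty_pages(pages: list) -> int:
--     """Remove pages with no content after deduplication."""
--     count = 0
--     i = 0
--     while i < len(pages):
--         if not pages[i].get("content"):
--             pages.pop(i)
--             count += 1
--         else:
--             i += 1
--     return count
-- ===== SOURCE B (Python) =====
-- def _remove_empty_pages(pages: list) -> int:
--     """Remove pages with no content after deduplication."""
--     w = 0
--     for p in pages:
--         if p.get("content"):
--             pages[w] = p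
--             w += 1
--     removed = len(pages) - w
--     del pages[w:]
--     return removed
-- ===== Notes on version B (the rewrite author's own statement) =====
-- stated objective: alternative
-- what changed: Replaced the while-loop that pops each empty page out of the list (shifting later elements on every removal) with a single in-place two-pointer compaction pass followed by one truncation; the returned count is len(pages) minus the write index.
import Mathlib
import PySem

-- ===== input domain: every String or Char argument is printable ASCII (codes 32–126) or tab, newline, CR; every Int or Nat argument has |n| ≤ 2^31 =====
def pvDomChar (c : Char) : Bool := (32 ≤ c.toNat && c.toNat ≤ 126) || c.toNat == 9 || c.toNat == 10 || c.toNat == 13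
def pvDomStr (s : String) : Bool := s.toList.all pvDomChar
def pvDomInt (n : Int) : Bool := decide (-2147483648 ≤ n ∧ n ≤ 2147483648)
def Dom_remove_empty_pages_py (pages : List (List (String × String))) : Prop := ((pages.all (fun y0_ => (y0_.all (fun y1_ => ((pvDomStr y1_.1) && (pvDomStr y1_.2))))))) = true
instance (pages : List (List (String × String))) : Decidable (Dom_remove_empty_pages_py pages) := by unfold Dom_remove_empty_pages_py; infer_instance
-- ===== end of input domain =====

-- B replaces A's pop-in-a-while-loop with a single in-place two-pointer compaction pass;
-- equivalence here is about the RETURN value only (both mutate `pages` identically in Python).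

-- shared truthiness test: `page.get("content")` is truthy (key present with non-empty value)
def pvHasContent (p : List (String × String)) : Bool :=
  match (PySem.Dict.mk p).get? "content" with
  | none => false
  | some s => !(s == "")

-- ===== PORT A =====
-- while i < len(pages): pop the current page (count += 1) if its content is falsy, else i += 1;
-- state = (count, suffix of pages not yet examined)
def pvALoop (count : Int) : List (List (String × String)) → Int
  | [] => count
  | p :: rest => if !(pvHasContent p) then pvALoop (count + 1) rest else pvALoop count rest

def remove_empty_pages_py (pages : List (List (String × String))) : Int :=
  pvALoop 0 pages

-- ===== PORT B =====
-- single pass advancing the write index w for every kept page; removed = len(pages) - w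
def remove_empty_pages_py_alt (pages : List (List (String × String))) : Int :=
  let w := pages.foldl (fun w p => if pvHasContent p then w + 1 else w) (0 : Int)
  (pages.length : Int) - w

-- ===== PRECONDITION & SPEC =====
def Spec_remove_empty_pages_py (pages : List (List (String × String))) (out : Int) : Prop := out = remove_empty_pages_py_alt pages
instance (pages : List (List (String × String))) (out : Int) : Decidable (Spec_remove_empty_pages_py pages out) := by unfold Spec_remove_empty_pages_py; infer_instance

-- ===== CLAIM (what is proved, stated in full; the proofs are below) =====
def Claim_equal_remove_empty_pages_py : Prop := ∀ (pages : List (List (String × String))), Dom_remove_empty_pages_py pages → Spec_remove_empty_pages_py pages (remove_empty_pages_py pages)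

-- ===== LEMMAS AND PROOFS =====

-- ===== VERDICT (by name: the statement is the Claim_ definition above) =====
theorem pvALoop_add_foldl (l : List (List (String × String))) :
    ∀ (c w : Int),
      pvALoop c l + l.foldl (fun w p => if pvHasContent p then w + 1 else w) w
        = c + w + (l.length : Int) := by
  induction l with
  | nil => intro c w; simp [pvALoop]
  | cons p rest ih =>
      intro c w
      by_cases h : pvHasContent p = true <;>
        simp [pvALoop, h, List.foldl, ih] <;> push_cast <;> ring

theorem remove_empty_pages_py_spec : Claim_equal_remove_empty_pages_py := by
  intro pages _
  unfold Spec_remove_empty_pages_py remove_empty_pages_py remove_empty_pages_py_alt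
  dsimp only
  have h := pvALoop_add_foldl pages 0 0
  omega
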